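-- pv_equiv track=rewrite | github.com/mujingw/leetcode-daily | backtracking/1593.py | maxUniqueSplit
-- ===== SOURCE A (Python) =====
-- def maxUniqueSplit(s: str) -> int:
--     N = len(s)
--
--     def dfs(res, pos, seen):
--         if pos == N:
--             res.append(len(seen))
--             return
--
--         for i in range(pos + 1, N + 1):
--             if s[pos:i] not in seen:
--                 seen.add(s[pos:i])
--                 dfs(res, i, seen)
--                 seen.remove(s[pos:i])
--
--     res = []
--     dfs(res, 0, set())
--
--     return max(res)
-- ===== SOURCE B (Python) =====
-- def maxUniqueSplit(s: str) -> int: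
--     N = len(s)
--
--     def compositions(pos):
--         # all ways to split s[pos:] into a list of nonempty parts
--         if pos == N:
--             return [[]]
--         return [[s[pos:i]] + rest
--                 for i in range(pos + 1, N + 1)
--                 for rest in compositions(i)]
--
--     return max(len(parts) for parts in compositions(0)
--                if len(set(parts)) == len(parts))
-- ===== Notes on version B (the rewrite author's own statement) =====
-- stated objective: alternative
-- what changed: B drops the backtracking seen-set DFS entirely: it enumerates every composition of the string into parts (generate stage), filters compositions whose parts are pairwise distinct with a per-composition set-size check, and takes the max length; no shared mutable set or pruning.
import Mathlib
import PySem

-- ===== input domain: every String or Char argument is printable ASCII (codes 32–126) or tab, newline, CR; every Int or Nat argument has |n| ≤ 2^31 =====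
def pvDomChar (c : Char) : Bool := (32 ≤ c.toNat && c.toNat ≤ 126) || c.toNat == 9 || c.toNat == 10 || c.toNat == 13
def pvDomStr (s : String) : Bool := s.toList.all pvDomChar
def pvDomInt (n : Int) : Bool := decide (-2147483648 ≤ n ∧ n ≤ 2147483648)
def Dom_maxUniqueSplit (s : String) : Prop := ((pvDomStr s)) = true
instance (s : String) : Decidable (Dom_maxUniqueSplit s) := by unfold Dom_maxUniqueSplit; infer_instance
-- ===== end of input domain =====

-- B replaces A's backtracking DFS with a shared seen-set by a generate-filter-max pipeline:
-- enumerate all compositions of s into parts, keep those whose parts are pairwise distinct,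
-- take the max part count (objective: alternative; not faster).

-- s[pos:i] (0 ≤ pos ≤ i here), shared by both ports
def pvSub (cs : List Char) (pos i : Nat) : List Char :=
  PySem.List.slice cs (some (pos : Int)) (some (i : Int))

-- ===== PORT A =====
-- dfs(res, pos, seen): Python mutates `res` and `seen`; here `res` is threaded as state and
-- returned, and the seen.add / recursive call / seen.remove sequence is ported by passing
-- `seen.add sub` down and keeping `seen` afterwards (the remove exactly undoes the add,
-- since the branch runs only when sub ∉ seen). fuel N+1 covers the recursion depth
-- (pos strictly increases towards N).
def dfsA (cs : List Char) (N : Nat) : Nat → List Int → Nat → PySem.Set (List Char) → List Int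
  | 0, res, _, _ => res   -- never reached from maxUniqueSplit's fuel
  | fuel+1, res, pos, seen =>
    if pos = N then res ++ [(PySem.Set.len seen : Int)]
    else (List.range' (pos+1) (N - pos)).foldl (fun r i =>
      if PySem.Set.contains seen (pvSub cs pos i) then r
      else dfsA cs N fuel r i (PySem.Set.add seen (pvSub cs pos i))) res

def maxUniqueSplit (s : String) : Int :=
  let cs := s.toList
  let N := cs.length
  let res := dfsA cs N (N+1) [] 0 PySem.Set.empty
  -- max(res): max? is none exactly on [], where Python's max would raise; this res is always
  -- nonempty (the one-part split reaches pos == N), so the .getD 0 default is a dead totalizer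
  (PySem.List.max? res (fun x => x)).getD 0

-- ===== PORT B =====
-- compositions(pos): all ways to split s[pos:] into nonempty parts; the nested list
-- comprehension is the flatMap over i of the map over the recursive results.
-- fuel N+1 covers the recursion depth (pos strictly increases towards N).
def comps (cs : List Char) (N : Nat) : Nat → Nat → List (List (List Char))
  | 0, _ => []   -- never reached from maxUniqueSplit_alt's fuel
  | fuel+1, pos =>
    if pos = N then [[]]
    else (List.range' (pos+1) (N - pos)).flatMap (fun i =>
      (comps cs N fuel i).map (fun rest => pvSub cs pos i :: rest))

def maxUniqueSplit_alt (s : String) : Int :=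
  let cs := s.toList
  let N := cs.length
  -- max(len(parts) for parts in compositions(0) if len(set(parts)) == len(parts)):
  -- the filtered generator becomes a filterMap; the list is never empty (the one-part
  -- composition passes the filter), so the .getD 0 default is a dead totalizer
  let vals := (comps cs N (N+1) 0).filterMap (fun parts =>
    if PySem.Set.len (PySem.Set.ofList parts) = (parts.length : Int)
    then some ((parts.length : Int)) else none)
  (PySem.List.max? vals (fun x => x)).getD 0

-- ===== PRECONDITION & SPEC =====
def Spec_maxUniqueSplit (s : String) (out : Int) : Prop := out = maxUniqueSplit_alt s
instance (s : String) (out : Int) : Decidable (Spec_maxUniqueSplit s out) := by unfold Spec_maxUniqueSplit; infer_instance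

-- ===== CLAIM (what is proved, stated in full; the proofs are below) =====
def Claim_equal_maxUniqueSplit : Prop := ∀ (s : String), Dom_maxUniqueSplit s → Spec_maxUniqueSplit s (maxUniqueSplit s)

-- ===== LEMMAS AND PROOFS =====

-- A's pruning condition along a whole composition: each part is new w.r.t. the growing set
def pvOk (seen : PySem.Set (List Char)) : List (List Char) → Bool
  | [] => true
  | x :: r => !(PySem.Set.contains seen x) && pvOk (PySem.Set.add seen x) r

lemma pv_len_add_of_not_mem (seen : PySem.Set (List Char)) (x : List Char)
    (h : PySem.Set.contains seen x = false) :
    PySem.Set.len (PySem.Set.add seen x) = PySem.Set.len seen + 1 := by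
  have hx : x ∉ seen := by
    simpa [PySem.Set.contains, List.contains_eq_mem] using h
  simp [PySem.Set.len, PySem.Set.add, List.contains_eq_mem, hx]

-- a foldl whose step only appends to its accumulator factors over the initial accumulator
lemma pv_foldl_acc_append {α : Type} (f : List Int → α → List Int)
    (hf : ∀ r i, f r i = r ++ f [] i) :
    ∀ (l : List α) (r : List Int), l.foldl f r = r ++ l.foldl f [] := by
  intro l
  induction l with
  | nil => intro r; simp
  | cons i t ih =>
    intro r
    simp only [List.foldl_cons]
    rw [ih (f r i), hf r i, ih (f [] i), List.append_assoc]

lemma dfsA_append (cs : List Char) (N : Nat) :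
    ∀ (fuel pos : Nat) (seen : PySem.Set (List Char)) (res : List Int),
      dfsA cs N fuel res pos seen = res ++ dfsA cs N fuel [] pos seen := by
  intro fuel
  induction fuel with
  | zero => intro pos seen res; simp [dfsA]
  | succ fuel ih =>
    intro pos seen res
    by_cases h : pos = N
    · simp [dfsA, h]
    · simp only [dfsA, h, if_false]
      exact pv_foldl_acc_append _
        (fun r i => by
          by_cases hc : pvSub cs pos i ∈ seen
          · simp [hc]
          · simp only [PySem.Set.contains, List.contains_eq_mem, decide_eq_true_eq, hc,
              if_false]
            exact ih i (PySem.Set.add seen (pvSub cs pos i)) r) _ res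

-- the bridge: A's leaf list from (pos, seen) is exactly B's composition list from pos,
-- filtered by pvOk seen and valued |seen| + number of parts
lemma dfsA_eq_filterMap (cs : List Char) (N : Nat) :
    ∀ (fuel pos : Nat) (seen : PySem.Set (List Char)),
      dfsA cs N fuel [] pos seen =
        (comps cs N fuel pos).filterMap (fun p =>
          if pvOk seen p then some ((PySem.Set.len seen : Int) + p.length) else none) := by
  intro fuel
  induction fuel with
  | zero => intro pos seen; simp [dfsA, comps]
  | succ fuel ih =>
    intro pos seen
    by_cases h : pos = N
    · simp [dfsA, comps, h, pvOk]
    · simp only [dfsA, comps, h, if_false, List.filterMap_flatMap]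
      rw [PySem.List.foldl_congr_mem _ _
        (fun r i => r ++ (if PySem.Set.contains seen (pvSub cs pos i) then []
          else dfsA cs N fuel [] i (PySem.Set.add seen (pvSub cs pos i)))) _ ?_,
        PySem.List.foldl_append_eq_flatMap]
      · simp only [List.nil_append]
        apply List.flatMap_congr  -- pointwise equality of the per-i chunks
        intro i _
        rw [List.filterMap_map]
        by_cases hm : pvSub cs pos i ∈ seen
        · simp [hm, pvOk]
        · have hc : PySem.Set.contains seen (pvSub cs pos i) = false := by
            simp [PySem.Set.contains, List.contains_eq_mem, hm]
          simp only [hc, Bool.false_eq_true, if_false]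
          rw [ih i (PySem.Set.add seen (pvSub cs pos i))]
          apply List.filterMap_congr
          intro r _
          simp only [Function.comp_apply, pvOk, hc, Bool.not_false, Bool.true_and]
          by_cases hok : pvOk (PySem.Set.add seen (pvSub cs pos i)) r = true
          · simp only [hok, if_true, Option.some.injEq,
              pv_len_add_of_not_mem seen (pvSub cs pos i) hc, List.length_cons]
            push_cast
            ring
          · simp [hok]
      · intro r i _
        by_cases hm : pvSub cs pos i ∈ seen
        · simp [hm]
        · have hc : PySem.Set.contains seen (pvSub cs pos i) = false := by
            simp [PySem.Set.contains, List.contains_eq_mem, hm]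
          simp only [hc, Bool.false_eq_true, if_false]
          exact dfsA_append cs N fuel i (PySem.Set.add seen (pvSub cs pos i)) r

-- pvOk from the empty set is exactly B's per-composition distinctness check
lemma pv_ok_spec :
    ∀ (p : List (List Char)) (seen : PySem.Set (List Char)),
      pvOk seen p = true ↔ p.Nodup ∧ ∀ x ∈ p, x ∉ seen := by
  intro p
  induction p with
  | nil => intro seen; simp [pvOk]
  | cons x r ih =>
    intro seen
    simp only [pvOk, Bool.and_eq_true, Bool.not_eq_true', List.nodup_cons, ih,
      PySem.Set.contains, List.contains_eq_mem, decide_eq_false_iff_not, List.mem_cons]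
    constructor
    · rintro ⟨hx, hnd, hall⟩
      refine ⟨⟨fun hxr => ?_, hnd⟩, ?_⟩
      · exact (hall x hxr) (by simp [PySem.Set.mem_add])
      · rintro y (rfl | hy)
        · exact hx
        · intro hys; exact hall y hy (by simp [PySem.Set.mem_add, hys])
    · rintro ⟨⟨hxr, hnd⟩, hall⟩
      refine ⟨hall x (Or.inl rfl), hnd, fun y hy hys => ?_⟩
      rcases (PySem.Set.mem_add _ _ _).mp hys with h1 | rfl
      · exact hall y (Or.inr hy) h1
      · exact hxr hy

-- set(xs) keeps first occurrences in order, so it is a sublist of xs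
lemma pv_ofList_sublist (p : List (List Char)) :
    List.Sublist (PySem.Set.ofList p) p := by
  induction p with
  | nil => simp [PySem.Set.ofList, PySem.Set.empty]
  | cons x xs ih =>
    rw [PySem.Set.ofList_cons]
    exact List.Sublist.cons₂ x ((List.filter_sublist).trans ih)

lemma pv_len_ofList_eq_iff (p : List (List Char)) :
    (PySem.Set.len (PySem.Set.ofList p) = (p.length : Int)) ↔ p.Nodup := by
  constructor
  · intro h
    have hlen : (PySem.Set.ofList p).length = p.length := by
      simpa [PySem.Set.len] using h
    have h2 := List.Sublist.eq_of_length (pv_ofList_sublist p) hlen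
    rw [← h2]; exact PySem.Set.nodup_ofList (xs := p)
  · intro h
    simp [PySem.Set.ofList_eq_self_of_nodup p h, PySem.Set.len]

-- ===== VERDICT (by name: the statement is the Claim_ definition above) =====
theorem maxUniqueSplit_spec : Claim_equal_maxUniqueSplit := by
  intro s _
  unfold Spec_maxUniqueSplit maxUniqueSplit maxUniqueSplit_alt
  simp only []
  rw [dfsA_eq_filterMap]
  have hlist : (comps s.toList s.toList.length (s.toList.length + 1) 0).filterMap
        (fun p => if pvOk (PySem.Set.empty (α := List Char)) p then
          some ((PySem.Set.len (PySem.Set.empty (α := List Char)) : Int) + p.length) else none)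
      = (comps s.toList s.toList.length (s.toList.length + 1) 0).filterMap
        (fun parts => if PySem.Set.len (PySem.Set.ofList parts) = (parts.length : Int)
          then some ((parts.length : Int)) else none) := by
    apply List.filterMap_congr
    intro p _
    have h1 : pvOk PySem.Set.empty p = true ↔ p.Nodup := by
      rw [pv_ok_spec]
      simp [PySem.Set.empty]
    have h2 := pv_len_ofList_eq_iff p
    by_cases hnd : p.Nodup
    · have hA : pvOk PySem.Set.empty p = true := h1.mpr hnd
      have hB : List.length (PySem.Set.ofList p) = p.length := by
        simpa [PySem.Set.len] using h2.mpr hnd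
      simp only [PySem.Set.empty] at hA
      simp [hA, hB]
    · have hA : pvOk PySem.Set.empty p = false := by
        rw [← Bool.not_eq_true]; exact fun hh => hnd (h1.mp hh)
      have hB : ¬ (List.length (PySem.Set.ofList p) = p.length) := by
        intro hh; exact hnd (h2.mp (by simp [PySem.Set.len, hh]))
      simp only [PySem.Set.empty] at hA
      simp [hA, hB]
  rw [hlist]
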